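-- pv_equiv track=rewrite | github.com/Anlh-ogr/electronic-chatbot | apps/api/app/infrastructure/exporters/pcb_layout_planner.py | _find_shared_nets
-- ===== SOURCE A (Python) =====
-- from typing import Dict, Tuple, List, Set
--
-- def _find_shared_nets(comps_a: List[str], comps_b: List[str],
--                       net_to_comps: Dict[str, Set[str]]) -> Set[str]:
--     shared = set()
--     set_a = set(comps_a)
--     set_b = set(comps_b)
--     for net_name, comps in net_to_comps.items():
--         if comps & set_a and comps & set_b:
--             shared.add(net_name)
--     return shared
-- ===== SOURCE B (Python) =====
-- def _find_shared_nets(comps_a, comps_b, net_to_comps):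
--     # Inverted index: component -> set of nets containing it; then the nets
--     # reachable from each group are unioned and the shared nets selected by
--     # membership, so no per-net set intersection is ever computed.
--     comp_to_nets = {}
--     for net, comps in net_to_comps.items():
--         for c in comps:
--             comp_to_nets.setdefault(c, set()).add(net)
--     nets_a = set()
--     for c in set(comps_a):
--         nets_a |= comp_to_nets.get(c, set())
--     nets_b = set()
--     for c in set(comps_b):
--         nets_b |= comp_to_nets.get(c, set())
--     return {net for net in net_to_comps if net in nets_a and net in nets_b}
-- ===== Notes on version B (the rewrite author's own statement) =====
-- stated objective: alternative
-- what changed: Replaces A's per-net set intersections with an inverted index (component -> nets built in one pass), unions the nets reachable from each component group, and selects shared nets by plain membership; Pre_ only excludes association lists with duplicate net names, which cannot arise from a Python dict.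
import Mathlib
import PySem

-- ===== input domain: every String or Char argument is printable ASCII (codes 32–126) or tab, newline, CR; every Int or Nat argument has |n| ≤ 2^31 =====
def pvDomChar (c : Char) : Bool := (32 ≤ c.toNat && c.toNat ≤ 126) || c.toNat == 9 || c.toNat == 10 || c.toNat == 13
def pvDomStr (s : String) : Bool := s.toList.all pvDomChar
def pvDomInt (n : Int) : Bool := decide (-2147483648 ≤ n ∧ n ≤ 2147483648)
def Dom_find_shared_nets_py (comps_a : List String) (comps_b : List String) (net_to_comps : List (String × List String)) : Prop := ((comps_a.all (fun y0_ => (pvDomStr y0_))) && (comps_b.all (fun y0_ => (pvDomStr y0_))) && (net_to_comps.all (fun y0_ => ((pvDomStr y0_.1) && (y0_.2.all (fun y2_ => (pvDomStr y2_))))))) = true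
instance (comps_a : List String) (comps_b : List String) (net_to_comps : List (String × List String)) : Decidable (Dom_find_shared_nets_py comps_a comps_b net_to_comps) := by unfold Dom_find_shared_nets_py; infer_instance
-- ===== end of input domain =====

-- B builds an inverted index component→nets, unions the nets reachable from each
-- group, and selects shared nets by membership, instead of A's per-net set
-- intersections (alternative algorithm, same asymptotic cost).


-- ===== PORT A =====
def find_shared_nets_py (comps_a : List String) (comps_b : List String) (net_to_comps : List (String × List String)) : List String :=
  let set_a : PySem.Set String := PySem.Set.ofList comps_a
  let set_b : PySem.Set String := PySem.Set.ofList comps_b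
  net_to_comps.foldl
    (fun shared p =>
      if !(PySem.Set.inter p.2 set_a).isEmpty && !(PySem.Set.inter p.2 set_b).isEmpty
      then PySem.Set.add shared p.1 else shared)
    (PySem.Set.empty : PySem.Set String)

-- ===== PORT B =====
def find_shared_nets_py_alt (comps_a : List String) (comps_b : List String) (net_to_comps : List (String × List String)) : List String :=
  -- comp_to_nets: for net, comps in items: for c in comps: setdefault(c, set()).add(net)
  let comp_to_nets : PySem.Dict String (PySem.Set String) :=
    net_to_comps.foldl
      (fun d p => p.2.foldl (fun d c => d.modify c [] (fun s => PySem.Set.add s p.1)) d)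
      PySem.Dict.empty
  let nets_a : PySem.Set String :=
    (PySem.Set.ofList comps_a).foldl (fun s c => PySem.Set.union s (comp_to_nets.getD c [])) (PySem.Set.empty : PySem.Set String)
  let nets_b : PySem.Set String :=
    (PySem.Set.ofList comps_b).foldl (fun s c => PySem.Set.union s (comp_to_nets.getD c [])) (PySem.Set.empty : PySem.Set String)
  net_to_comps.foldl
    (fun r p => if nets_a.contains p.1 && nets_b.contains p.1 then PySem.Set.add r p.1 else r)
    (PySem.Set.empty : PySem.Set String)

-- ===== PRECONDITION & SPEC =====
-- Pre_ excludes only association lists with duplicate net names: a Python dict's keys are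
-- unique by construction, so no Python call to A has such an input.
def Pre_find_shared_nets_py (comps_a : List String) (comps_b : List String) (net_to_comps : List (String × List String)) : Prop :=
  (net_to_comps.map Prod.fst).Nodup
instance (comps_a : List String) (comps_b : List String) (net_to_comps : List (String × List String)) : Decidable (Pre_find_shared_nets_py comps_a comps_b net_to_comps) := by unfold Pre_find_shared_nets_py; infer_instance

def pvWitness_find_shared_nets_py : List String × List String × (List (String × List String)) :=
  (["c1"], ["c2"], [("n1", ["c1", "c2"]), ("n2", ["c1"])])

def Spec_find_shared_nets_py (comps_a : List String) (comps_b : List String) (net_to_comps : List (String × List String)) (out : List String) : Prop := out = find_shared_nets_py_alt comps_a comps_b net_to_comps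
instance (comps_a : List String) (comps_b : List String) (net_to_comps : List (String × List String)) (out : List String) : Decidable (Spec_find_shared_nets_py comps_a comps_b net_to_comps out) := by unfold Spec_find_shared_nets_py; infer_instance

-- ===== CLAIM (what is proved, stated in full; the proofs are below) =====
def Claim_equal_find_shared_nets_py : Prop := ∀ (comps_a : List String) (comps_b : List String) (net_to_comps : List (String × List String)), Dom_find_shared_nets_py comps_a comps_b net_to_comps → Pre_find_shared_nets_py comps_a comps_b net_to_comps → Spec_find_shared_nets_py comps_a comps_b net_to_comps (find_shared_nets_py comps_a comps_b net_to_comps)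

-- ===== LEMMAS AND PROOFS =====

-- A conditional set-building fold over an assoc list with distinct keys and a
-- key-disjoint accumulator is the accumulator followed by the filtered keys.
theorem pv_fold_add_eq (c : String × List String → Bool) :
    ∀ (m : List (String × List String)) (acc : List String),
      (m.map Prod.fst).Nodup → (∀ p ∈ m, p.1 ∉ acc) →
      m.foldl (fun s p => if c p then PySem.Set.add s p.1 else s) acc
        = acc ++ (m.filter c).map Prod.fst := by
  intro m
  induction m with
  | nil => intro acc _ _; simp
  | cons p rest ih =>
    intro acc hnd hdisj
    simp only [List.map_cons, List.nodup_cons] at hnd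
    by_cases hc : c p
    · have hadd : PySem.Set.add acc p.1 = acc ++ [p.1] :=
        PySem.Set.add_of_not_mem (hdisj p (by simp))
      have hrest : ∀ q ∈ rest, q.1 ∉ acc ++ [p.1] := by
        intro q hq
        simp only [List.mem_append, List.mem_singleton]
        rintro (h1 | h2)
        · exact hdisj q (by simp [hq]) h1
        · exact hnd.1 (h2 ▸ List.mem_map_of_mem hq)
      simp only [List.foldl_cons, hc, if_pos, hadd, List.filter_cons_of_pos hc]
      rw [ih (acc ++ [p.1]) hnd.2 hrest]
      simp
    · simp only [List.foldl_cons, hc, List.filter_cons_of_neg (by simpa using hc)]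
      exact ih acc hnd.2 (fun q hq => hdisj q (by simp [hq]))

-- Membership in the inner index-building fold over one net's component list.
theorem pv_mem_inner (net : String) :
    ∀ (comps : List String) (d : PySem.Dict String (PySem.Set String)) (c y : String),
      y ∈ (comps.foldl (fun d c' => d.modify c' [] (fun s => PySem.Set.add s net)) d).getD c []
        ↔ y ∈ d.getD c [] ∨ (c ∈ comps ∧ y = net) := by
  intro comps
  induction comps with
  | nil => intro d c y; simp
  | cons c0 rest ih =>
    intro d c y
    simp only [List.foldl_cons]
    rw [ih, PySem.Dict.getD_modify]
    split_ifs with hc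
    · subst hc
      simp only [PySem.Set.mem_add, List.mem_cons]
      tauto
    · simp only [List.mem_cons]
      tauto

-- Membership characterisation of the whole inverted index.
theorem pv_mem_index :
    ∀ (m : List (String × List String)) (d : PySem.Dict String (PySem.Set String)) (c y : String),
      y ∈ (m.foldl (fun d p => p.2.foldl (fun d c' => d.modify c' [] (fun s => PySem.Set.add s p.1)) d) d).getD c []
        ↔ y ∈ d.getD c [] ∨ ∃ p ∈ m, p.1 = y ∧ c ∈ p.2 := by
  intro m
  induction m with
  | nil => intro d c y; simp
  | cons p rest ih =>
    intro d c y
    simp only [List.foldl_cons]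
    rw [ih, pv_mem_inner]
    simp only [List.mem_cons]
    constructor
    · rintro (((h | ⟨h1, h2⟩) ) | ⟨q, hq, h1, h2⟩)
      · exact Or.inl h
      · exact Or.inr ⟨p, Or.inl rfl, h2.symm, h1⟩
      · exact Or.inr ⟨q, Or.inr hq, h1, h2⟩
    · rintro (h | ⟨q, (hq | hq), h1, h2⟩)
      · exact Or.inl (Or.inl h)
      · subst hq; exact Or.inl (Or.inr ⟨h2, h1.symm⟩)
      · exact Or.inr ⟨q, hq, h1, h2⟩

-- Membership in the union-accumulating fold over a component group.
theorem pv_mem_group (idx : PySem.Dict String (PySem.Set String)) :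
    ∀ (comps : List String) (s : PySem.Set String) (y : String),
      y ∈ comps.foldl (fun s c => PySem.Set.union s (idx.getD c [])) s
        ↔ y ∈ s ∨ ∃ c ∈ comps, y ∈ idx.getD c [] := by
  intro comps
  induction comps with
  | nil => intro s y; simp
  | cons c0 rest ih =>
    intro s y
    simp only [List.foldl_cons]
    rw [ih]
    rw [PySem.Set.mem_union]
    simp only [List.mem_cons]
    constructor
    · rintro ((h | h) | ⟨c, hc, h⟩)
      · exact Or.inl h
      · exact Or.inr ⟨c0, Or.inl rfl, h⟩
      · exact Or.inr ⟨c, Or.inr hc, h⟩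
    · rintro (h | ⟨c, (hc | hc), h⟩)
      · exact Or.inl (Or.inl h)
      · subst hc; exact Or.inl (Or.inr h)
      · exact Or.inr ⟨c, hc, h⟩

theorem find_shared_nets_py_spec_aux (comps_a : List String) (comps_b : List String)
    (net_to_comps : List (String × List String))
    (hnd : (net_to_comps.map Prod.fst).Nodup) :
    find_shared_nets_py comps_a comps_b net_to_comps
      = find_shared_nets_py_alt comps_a comps_b net_to_comps := by
  unfold find_shared_nets_py find_shared_nets_py_alt
  dsimp only
  rw [pv_fold_add_eq _ net_to_comps _ hnd (by simp [PySem.Set.empty]),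
      pv_fold_add_eq _ net_to_comps _ hnd (by simp [PySem.Set.empty])]
  refine congrArg (fun l => _ ++ (List.map Prod.fst l)) (List.filter_congr ?_)
  intro p hp
  have hmemA : ∀ (comps : List String),
      (List.foldl (fun s c => PySem.Set.union s
          ((net_to_comps.foldl (fun d q => q.2.foldl
              (fun d c' => d.modify c' [] (fun s => PySem.Set.add s q.1)) d)
            PySem.Dict.empty).getD c [])) PySem.Set.empty (PySem.Set.ofList comps)).contains p.1
        = !(PySem.Set.inter p.2 (PySem.Set.ofList comps)).isEmpty := by
    intro comps
    have h1 : (List.foldl (fun s c => PySem.Set.union s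
          ((net_to_comps.foldl (fun d q => q.2.foldl
              (fun d c' => d.modify c' [] (fun s => PySem.Set.add s q.1)) d)
            PySem.Dict.empty).getD c [])) PySem.Set.empty (PySem.Set.ofList comps)).contains p.1 = true
        ↔ ∃ c ∈ p.2, c ∈ comps := by
      rw [PySem.Set.contains_iff, pv_mem_group]
      simp only [pv_mem_index, PySem.Dict.getD_empty, PySem.Set.empty, List.not_mem_nil,
        false_or, PySem.Set.mem_ofList]
      constructor
      · rintro ⟨c, hc, q, hq, hq1, hq2⟩
        have : q = p := List.inj_on_of_nodup_map hnd hq hp hq1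
        exact ⟨c, this ▸ hq2, hc⟩
      · rintro ⟨c, hc2, hcc⟩
        exact ⟨c, hcc, p, hp, rfl, hc2⟩
    have h2 : (!(PySem.Set.inter p.2 (PySem.Set.ofList comps)).isEmpty) = true
        ↔ ∃ c ∈ p.2, c ∈ comps := by
      simp [PySem.Set.inter, PySem.Set.contains_eq_listContains, PySem.Set.mem_ofList]
    rw [Bool.eq_iff_iff, h1, h2]
  rw [hmemA comps_a, hmemA comps_b]

-- ===== VERDICT (by name: the statement is the Claim_ definition above) =====
theorem find_shared_nets_py_spec : Claim_equal_find_shared_nets_py := by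
  intro comps_a comps_b net_to_comps _ hpre
  exact find_shared_nets_py_spec_aux comps_a comps_b net_to_comps hpre
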